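-- pv_equiv track=rewrite | github.com/martin-anderson-graham/advent-of-code | 2019/Day 8 - Image Format/day8.py | createPixelArray
-- ===== SOURCE A (Python) =====
-- def createPixelArray(width,height,pixels):
--     result=[[[]]]
--     lineCount=0
--     layer=0
--     for i in pixels:
--         if len(result[layer][lineCount])==width:
--             lineCount+=1
--             if lineCount==height:
--                 lineCount=0
--                 layer+=1
--                 result.append([])
--             result[layer].append([])
--         result[layer][lineCount].append(i)
--
--     return result
-- ===== SOURCE B (Python) =====
-- def _lines(pixels, width):
--     # split pixels into rows: a row is closed once it holds `width` pixels
--     # and another pixel arrives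
--     cur = []
--     for p in pixels:
--         if len(cur) == width:
--             yield cur
--             cur = [p]
--         else:
--             cur.append(p)
--     yield cur
--
--
-- def createPixelArray(width, height, pixels):
--     layers = []
--     layer = []
--     for line in _lines(pixels, width):
--         layer.append(line)
--         if len(layer) == height:
--             layers.append(layer)
--             layer = []
--     if layer:
--         layers.append(layer)
--     return layers
-- ===== Notes on version B (the rewrite author's own statement) =====
-- stated objective: simpler
-- what changed: Replaces the single pass that mutates a nested result via layer/lineCount counters and in-place indexing with a two-stage decomposition: a generator that splits the flat pixels into rows, and a grouping loop that collects rows into layers.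
import Mathlib
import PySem

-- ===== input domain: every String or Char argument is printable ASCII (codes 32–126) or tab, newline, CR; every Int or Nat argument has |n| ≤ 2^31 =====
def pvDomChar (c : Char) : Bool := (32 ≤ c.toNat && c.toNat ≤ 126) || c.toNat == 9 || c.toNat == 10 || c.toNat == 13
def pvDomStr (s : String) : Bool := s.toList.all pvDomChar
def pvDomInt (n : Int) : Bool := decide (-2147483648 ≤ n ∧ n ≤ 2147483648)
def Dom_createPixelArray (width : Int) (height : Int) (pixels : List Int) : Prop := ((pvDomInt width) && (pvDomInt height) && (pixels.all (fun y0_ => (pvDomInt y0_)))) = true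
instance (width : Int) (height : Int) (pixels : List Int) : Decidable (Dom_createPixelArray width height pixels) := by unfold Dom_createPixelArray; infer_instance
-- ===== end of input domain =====

-- B replaces A's single pass that mutates a nested result through layer/lineCount
-- counters and index arithmetic by a two-stage decomposition (split into rows, then
-- group rows into layers); objective: simpler, same O(n) cost.


-- ===== PORT A =====
-- A's loop body: state (result, lineCount, layer); Python's in-place appends become
-- List.modify at the same indices (those indices are always in range in A, so the
-- getD/modify defaults are never taken).
def pvStepA (width : Int) (height : Int)
    (s : List (List (List Int)) × Nat × Nat) (i : Int) :
    List (List (List Int)) × Nat × Nat :=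
  let (result, lineCount, layer) := s
  let (result, lineCount, layer) :=
    if (((result.getD layer []).getD lineCount []).length : Int) = width then
      let lineCount := lineCount + 1
      let (result, lineCount, layer) :=
        if (lineCount : Int) = height then (result ++ [[]], 0, layer + 1)
        else (result, lineCount, layer)
      (result.modify layer (fun lay => lay ++ [[]]), lineCount, layer)
    else (result, lineCount, layer)
  (result.modify layer (fun lay => lay.modify lineCount (fun ln => ln ++ [i])), lineCount, layer)

def createPixelArray (width : Int) (height : Int) (pixels : List Int) : List (List (List Int)) :=
  (pixels.foldl (pvStepA width height) ([[[]]], 0, 0)).1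

-- ===== PORT B =====
-- Source B's `_lines` generator: (yielded rows so far, current row); the final `yield cur`
-- is the trailing `++ [cur]`.
def pvLineStep (width : Int) (s : List (List Int) × List Int) (p : Int) :
    List (List Int) × List Int :=
  if (s.2.length : Int) = width then (s.1 ++ [s.2], [p]) else (s.1, s.2 ++ [p])

def pvLines (pixels : List Int) (width : Int) : List (List Int) :=
  let s := pixels.foldl (pvLineStep width) ([], [])
  s.1 ++ [s.2]

-- Source B's grouping loop body: append the row, close the layer when it reaches `height`.
def pvGroupStep (height : Int) (s : List (List (List Int)) × List (List Int))
    (line : List Int) : List (List (List Int)) × List (List Int) :=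
  let layer := s.2 ++ [line]
  if (layer.length : Int) = height then (s.1 ++ [layer], []) else (s.1, layer)

def createPixelArray_alt (width : Int) (height : Int) (pixels : List Int) : List (List (List Int)) :=
  let s := (pvLines pixels width).foldl (pvGroupStep height) ([], [])
  if s.2.isEmpty then s.1 else s.1 ++ [s.2]

-- ===== PRECONDITION & SPEC =====
def Spec_createPixelArray (width : Int) (height : Int) (pixels : List Int) (out : List (List (List Int))) : Prop := out = createPixelArray_alt width height pixels
instance (width : Int) (height : Int) (pixels : List Int) (out : List (List (List Int))) : Decidable (Spec_createPixelArray width height pixels out) := by unfold Spec_createPixelArray; infer_instance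

-- ===== CLAIM (what is proved, stated in full; the proofs are below) =====
def Claim_equal_createPixelArray : Prop := ∀ (width : Int) (height : Int) (pixels : List Int), Dom_createPixelArray width height pixels → Spec_createPixelArray width height pixels (createPixelArray width height pixels)

-- ===== LEMMAS AND PROOFS =====

-- Fused single pass of B: run the row split and feed each closed row to the grouper
-- immediately.  State: ((layers, current layer), current row).
def pvGStep (width : Int) (height : Int)
    (s : (List (List (List Int)) × List (List Int)) × List Int) (p : Int) :
    (List (List (List Int)) × List (List Int)) × List Int :=
  if (s.2.length : Int) = width then (pvGroupStep height s.1 s.2, [p]) else (s.1, s.2 ++ [p])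

theorem pv_getD_append_last {α : Type} (l : List α) (x d : α) :
    (l ++ [x]).getD l.length d = x := by
  simp [List.getD]

theorem pv_modify_append_last {α : Type} (l : List α) (x : α) (f : α → α) :
    (l ++ [x]).modify l.length f = l ++ [f x] := by
  simp [List.modify_eq_set_getElem?]

-- The inner row-split fold only ever appends to the list of closed rows.
theorem pv_inner_shift (width : Int) (p : List Int) (o : List (List Int)) (c : List Int) :
    p.foldl (pvLineStep width) (o, c) =
      (o ++ (p.foldl (pvLineStep width) ([], c)).1, (p.foldl (pvLineStep width) ([], c)).2) := by
  induction p generalizing o c with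
  | nil => simp
  | cons x p ih =>
    simp only [List.foldl_cons, pvLineStep]
    by_cases h : (c.length : Int) = width
    · simp only [if_pos h, List.nil_append]
      rw [ih (o ++ [c]) [x], ih [c] [x]]
      simp
    · simp only [if_neg h]
      exact ih o (c ++ [x])

-- Fusion: the fused pass equals row split followed by grouping.
theorem pv_fuse (width height : Int) (p : List Int)
    (s2 : List (List (List Int)) × List (List Int)) (c : List Int) :
    p.foldl (pvGStep width height) (s2, c) =
      ((p.foldl (pvLineStep width) ([], c)).1.foldl (pvGroupStep height) s2,
        (p.foldl (pvLineStep width) ([], c)).2) := by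
  induction p generalizing s2 c with
  | nil => simp
  | cons x p ih =>
    simp only [List.foldl_cons, pvGStep, pvLineStep]
    by_cases h : (c.length : Int) = width
    · simp only [if_pos h, List.nil_append]
      rw [ih (pvGroupStep height s2 c) [x], pv_inner_shift width p [c] [x]]
      simp
    · simp only [if_neg h]
      exact ih s2 (c ++ [x])

-- Simulation: A's fold state is always (o2 ++ [c2 ++ [c1]], |c2|, |o2|) where
-- ((o2, c2), c1) is the fused B state.
theorem pv_sim (width height : Int) (p : List Int)
    (o2 : List (List (List Int))) (c2 : List (List Int)) (c1 : List Int) :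
    p.foldl (pvStepA width height) (o2 ++ [c2 ++ [c1]], c2.length, o2.length) =
      (((p.foldl (pvGStep width height) ((o2, c2), c1)).1.1 ++
          [(p.foldl (pvGStep width height) ((o2, c2), c1)).1.2 ++
            [(p.foldl (pvGStep width height) ((o2, c2), c1)).2]]),
        (p.foldl (pvGStep width height) ((o2, c2), c1)).1.2.length,
        (p.foldl (pvGStep width height) ((o2, c2), c1)).1.1.length) := by
  induction p generalizing o2 c2 c1 with
  | nil => simp
  | cons x p ih =>
    simp only [List.foldl_cons, pvStepA, pvGStep, pvGroupStep, Nat.cast_add, Nat.cast_one]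
    rw [pv_getD_append_last, pv_getD_append_last]
    by_cases hw : (c1.length : Int) = width
    · simp only [if_pos hw]
      by_cases hh : (c2.length : Int) + 1 = height
      · have hh' : ((c2 ++ [c1]).length : Int) = height := by
          simp only [List.length_append, List.length_cons, List.length_nil]
          push_cast
          omega
        simp only [if_pos hh, if_pos hh']
        have h0 : ((o2 ++ [c2 ++ [c1]]) ++ [([] : List (List Int))]).modify
            (o2.length + 1) (fun lay => lay ++ [[]]) =
            (o2 ++ [c2 ++ [c1]]) ++ [[[]]] := by
          have := pv_modify_append_last (o2 ++ [c2 ++ [c1]]) ([] : List (List Int))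
            (fun lay => lay ++ [[]])
          simpa [List.length_append] using this
        have h1 : ((o2 ++ [c2 ++ [c1]]) ++ [[([] : List Int)]]).modify
            (o2.length + 1)
            (fun lay => lay.modify 0 (fun ln => ln ++ [x])) =
            (o2 ++ [c2 ++ [c1]]) ++ [[[x]]] := by
          have := pv_modify_append_last (o2 ++ [c2 ++ [c1]]) [([] : List Int)]
            (fun lay => lay.modify 0 (fun ln => ln ++ [x]))
          simpa [List.length_append, List.modify] using this
        simp only [List.append_assoc] at h0 h1 ⊢
        rw [h0, h1]
        simpa using ih (o2 ++ [c2 ++ [c1]]) [] [x]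
      · have hh' : ¬ ((c2 ++ [c1]).length : Int) = height := by
          simp only [List.length_append, List.length_cons, List.length_nil]
          push_cast
          omega
        simp only [if_neg hh, if_neg hh']
        have h0 : (o2 ++ [c2 ++ [c1]]).modify o2.length (fun lay => lay ++ [[]]) =
            o2 ++ [(c2 ++ [c1]) ++ [[]]] := pv_modify_append_last _ _ _
        have h1 : (o2 ++ [(c2 ++ [c1]) ++ [([] : List Int)]]).modify o2.length
            (fun lay => lay.modify (c2.length + 1) (fun ln => ln ++ [x])) =
            o2 ++ [(c2 ++ [c1]) ++ [[x]]] := by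
          rw [pv_modify_append_last]
          have := pv_modify_append_last (c2 ++ [c1]) ([] : List Int) (fun ln => ln ++ [x])
          simp only [List.length_append, List.length_cons, List.length_nil] at this
          rw [this]
          simp
        rw [h0, h1]
        have := ih o2 (c2 ++ [c1]) [x]
        simpa [List.length_append] using this
    · simp only [if_neg hw]
      have h1 : (o2 ++ [c2 ++ [c1]]).modify o2.length
          (fun lay => lay.modify c2.length (fun ln => ln ++ [x])) =
          o2 ++ [c2 ++ [c1 ++ [x]]] := by
        rw [pv_modify_append_last, pv_modify_append_last]
      rw [h1]
      exact ih o2 c2 (c1 ++ [x])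

-- ===== VERDICT (by name: the statement is the Claim_ definition above) =====
theorem createPixelArray_spec : Claim_equal_createPixelArray := by
  intro width height pixels _
  show createPixelArray width height pixels = createPixelArray_alt width height pixels
  unfold createPixelArray createPixelArray_alt pvLines
  rw [pv_inner_shift width pixels [] []]
  have hsim := pv_sim width height pixels [] [] []
  simp only [List.length_nil, List.nil_append] at hsim ⊢
  rw [hsim, pv_fuse width height pixels ([], []) []]
  rw [List.foldl_append]
  simp only [List.foldl_cons, List.foldl_nil]
  set s := ((pixels.foldl (pvLineStep width) ([], [])).1.foldl (pvGroupStep height) ([], []))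
  set c := (pixels.foldl (pvLineStep width) ([], [])).2
  simp only [pvGroupStep]
  by_cases h : ((s.2 ++ [c]).length : Int) = height
  · simp only [if_pos h, List.isEmpty_nil, if_true]
  · simp only [if_neg h]
    have hne : (s.2 ++ [c]).isEmpty = false := by simp
    simp [hne]
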